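-- pv_equiv track=rewrite | github.com/MatiasMollo/algoritmia | TP7/12.py | verifyOrder
-- ===== SOURCE A (Python) =====
-- def verifyOrder(array):
--     ret = 0
--     ascendente = True
--     descendente = True
--     i = 0
--
--     while i < len(array) - 1 and ascendente:
--         ret = 1
--         if array[i] > array[i + 1]:
--             ascendente = False
--         i += 1
--
--     i = 0
--
--     while i < len(array) - 1 and descendente:
--         if array[i] < array[i + 1]:
--             descendente = False
--         i += 1
--
--     if ascendente and not descendente:
--         ret = 1
--     elif not ascendente and descendente:
--         ret = -1
--     else:
--         ret = 0
--
--     return ret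
-- ===== SOURCE B (Python) =====
-- def verifyOrder(array):
--     a = list(array)
--     asc = a == sorted(a)
--     desc = a == sorted(a, reverse=True)
--     if asc and not desc:
--         return 1
--     if desc and not asc:
--         return -1
--     return 0
-- ===== Notes on version B (the rewrite author's own statement) =====
-- stated objective: simpler
-- what changed: Replaces the two index-driven while loops with flag state by comparing the list against its sorted and reverse-sorted witnesses.
import Mathlib
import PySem

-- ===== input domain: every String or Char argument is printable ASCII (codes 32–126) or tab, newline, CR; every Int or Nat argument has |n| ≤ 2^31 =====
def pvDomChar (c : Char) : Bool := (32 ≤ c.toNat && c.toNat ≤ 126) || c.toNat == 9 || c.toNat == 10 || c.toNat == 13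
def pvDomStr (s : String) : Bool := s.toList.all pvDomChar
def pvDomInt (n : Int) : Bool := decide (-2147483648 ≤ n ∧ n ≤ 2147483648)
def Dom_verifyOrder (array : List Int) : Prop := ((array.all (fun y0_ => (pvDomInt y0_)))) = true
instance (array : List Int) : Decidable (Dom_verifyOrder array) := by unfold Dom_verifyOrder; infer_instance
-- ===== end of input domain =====

-- ===== PORT A =====
-- One line: B checks order by comparing the list with its sorted / reverse-sorted copy instead of A's two index loops; same values everywhere.
-- A's first while loop: i advances while i < len-1 and asc; a[i] (always in range here) is List.getD.
def pvLoopAsc (array : List Int) (i : Nat) (asc : Bool) (ret : Int) : Bool × Int :=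
  if _h : i < array.length - 1 ∧ asc then
    pvLoopAsc array (i + 1)
      (if array.getD i 0 > array.getD (i + 1) 0 then false else asc) 1
  else (asc, ret)
termination_by array.length - 1 - i

def pvLoopDesc (array : List Int) (i : Nat) (desc : Bool) : Bool :=
  if _h : i < array.length - 1 ∧ desc then
    pvLoopDesc array (i + 1)
      (if array.getD i 0 < array.getD (i + 1) 0 then false else desc)
  else desc
termination_by array.length - 1 - i

def verifyOrder (array : List Int) : Int :=
  let r1 := pvLoopAsc array 0 true 0
  let asc := r1.1
  let desc := pvLoopDesc array 0 true
  if asc && !desc then 1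
  else if !asc && desc then -1
  else 0

-- ===== PORT B =====
def verifyOrder_alt (array : List Int) : Int :=
  let a := array
  let asc := a == PySem.List.sorted a (fun x => x) false
  let desc := a == PySem.List.sorted a (fun x => x) true
  if asc && !desc then 1
  else if desc && !asc then -1
  else 0

-- ===== PRECONDITION & SPEC =====
def Spec_verifyOrder (array : List Int) (out : Int) : Prop := out = verifyOrder_alt array
instance (array : List Int) (out : Int) : Decidable (Spec_verifyOrder array out) := by unfold Spec_verifyOrder; infer_instance

-- ===== CLAIM (what is proved, stated in full; the proofs are below) =====
def Claim_equal_verifyOrder : Prop := ∀ (array : List Int), Dom_verifyOrder array → Spec_verifyOrder array (verifyOrder array)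

-- ===== LEMMAS AND PROOFS =====

theorem pvLoopAsc_false (a : List Int) (i : Nat) (r : Int) :
    pvLoopAsc a i false r = (false, r) := by
  unfold pvLoopAsc; simp

theorem pvLoopDesc_false (a : List Int) (i : Nat) :
    pvLoopDesc a i false = false := by
  unfold pvLoopDesc; simp

theorem pvLoopAsc_flag (a : List Int) :
    ∀ n i r, a.length - 1 - i = n →
      ((pvLoopAsc a i true r).1 = true ↔
        ∀ j, i ≤ j → j + 1 < a.length → a.getD j 0 ≤ a.getD (j + 1) 0) := by
  intro n
  induction n with
  | zero =>
    intro i r h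
    unfold pvLoopAsc
    rw [dif_neg (by omega)]
    simp only [true_iff]
    intro j hj hlen; omega
  | succ n ih =>
    intro i r h
    unfold pvLoopAsc
    rw [dif_pos ⟨by omega, rfl⟩]
    by_cases hgt : a.getD i 0 > a.getD (i + 1) 0
    · rw [if_pos hgt, pvLoopAsc_false]
      simp only [Bool.false_eq_true, false_iff, not_forall]
      exact ⟨i, le_refl i, by omega, by omega⟩
    · rw [if_neg hgt, ih (i + 1) 1 (by omega)]
      constructor
      · intro hall j hj hlen
        rcases Nat.eq_or_lt_of_le hj with rfl | hj'
        · omega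
        · exact hall j hj' hlen
      · intro hall j hj hlen
        exact hall j (by omega) hlen
 
theorem pvLoopDesc_flag (a : List Int) :
    ∀ n i, a.length - 1 - i = n →
      ((pvLoopDesc a i true) = true ↔
        ∀ j, i ≤ j → j + 1 < a.length → a.getD (j + 1) 0 ≤ a.getD j 0) := by
  intro n
  induction n with
  | zero =>
    intro i h
    unfold pvLoopDesc
    rw [dif_neg (by omega)]
    simp only [true_iff]
    intro j hj hlen; omega
  | succ n ih =>
    intro i h
    unfold pvLoopDesc
    rw [dif_pos ⟨by omega, rfl⟩]
    by_cases hlt : a.getD i 0 < a.getD (i + 1) 0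
    · rw [if_pos hlt, pvLoopDesc_false]
      simp only [Bool.false_eq_true, false_iff, not_forall]
      exact ⟨i, le_refl i, by omega, by omega⟩
    · rw [if_neg hlt, ih (i + 1) (by omega)]
      constructor
      · intro hall j hj hlen
        rcases Nat.eq_or_lt_of_le hj with rfl | hj'
        · omega
        · exact hall j hj' hlen
      · intro hall j hj hlen
        exact hall j (by omega) hlen

theorem adj_iff_getElem_le (a : List Int) :
    (∀ j, 0 ≤ j → j + 1 < a.length → a.getD j 0 ≤ a.getD (j + 1) 0) ↔
      (∀ (j : Nat) (h : j + 1 < a.length), a[j] ≤ a[j + 1]) := by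
  constructor
  · intro h j hj
    have := h j (Nat.zero_le j) hj
    simpa [List.getD_eq_getElem?_getD, List.getElem?_eq_getElem (Nat.lt_of_succ_lt hj), List.getElem?_eq_getElem hj]
      using this
  · intro h j _ hj
    have := h j hj
    simpa [List.getD_eq_getElem?_getD, List.getElem?_eq_getElem (Nat.lt_of_succ_lt hj), List.getElem?_eq_getElem hj]
      using this

theorem adj_iff_getElem_ge (a : List Int) :
    (∀ j, 0 ≤ j → j + 1 < a.length → a.getD (j + 1) 0 ≤ a.getD j 0) ↔
      (∀ (j : Nat) (h : j + 1 < a.length), a[j + 1] ≤ a[j]) := by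
  constructor
  · intro h j hj
    have := h j (Nat.zero_le j) hj
    simpa [List.getD_eq_getElem?_getD, List.getElem?_eq_getElem (Nat.lt_of_succ_lt hj), List.getElem?_eq_getElem hj]
      using this
  · intro h j _ hj
    have := h j hj
    simpa [List.getD_eq_getElem?_getD, List.getElem?_eq_getElem (Nat.lt_of_succ_lt hj), List.getElem?_eq_getElem hj]
      using this

theorem eq_sorted_iff_adj (a : List Int) :
    (a = PySem.List.sorted a (fun x => x) false) ↔
      (∀ (j : Nat) (h : j + 1 < a.length), a[j] ≤ a[j + 1]) := by
  constructor
  · intro h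
    have hp : a.Pairwise (fun x y => x ≤ y) := by
      rw [h]; exact PySem.List.sorted_pairwise a (fun x => x)
    have hc : a.IsChain (fun x y => x ≤ y) := List.isChain_iff_pairwise.mpr hp
    exact List.isChain_iff_getElem.mp hc
  · intro h
    have hc : a.IsChain (fun x y : Int => x ≤ y) := List.isChain_iff_getElem.mpr h
    have hp : a.Pairwise (fun x y : Int => x ≤ y) := List.isChain_iff_pairwise.mp hc
    exact (PySem.List.sorted_eq_self_of_pairwise a (fun x => x) hp).symm

theorem eq_sorted_rev_iff_adj (a : List Int) :
    (a = PySem.List.sorted a (fun x => x) true) ↔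
      (∀ (j : Nat) (h : j + 1 < a.length), a[j + 1] ≤ a[j]) := by
  constructor
  · intro h
    have hp : a.Pairwise (fun x y : Int => y ≤ x) := by
      rw [h]; exact PySem.List.sorted_pairwise_rev a (fun x => x)
    have hc : a.IsChain (fun x y : Int => y ≤ x) := List.isChain_iff_pairwise.mpr hp
    exact List.isChain_iff_getElem.mp hc
  · intro h
    have hc : a.IsChain (fun x y : Int => y ≤ x) := List.isChain_iff_getElem.mpr h
    have hp : a.Pairwise (fun x y : Int => y ≤ x) := List.isChain_iff_pairwise.mp hc
    exact (PySem.List.sorted_rev_eq_self_of_pairwise a (fun x => x) hp).symm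

theorem asc_flag_eq (a : List Int) (r : Int) :
    (pvLoopAsc a 0 true r).1 = (a == PySem.List.sorted a (fun x => x) false) := by
  rw [Bool.eq_iff_iff]
  rw [pvLoopAsc_flag a (a.length - 1 - 0) 0 r rfl]
  rw [adj_iff_getElem_le, beq_iff_eq, eq_sorted_iff_adj]

theorem desc_flag_eq (a : List Int) :
    (pvLoopDesc a 0 true) = (a == PySem.List.sorted a (fun x => x) true) := by
  rw [Bool.eq_iff_iff]
  rw [pvLoopDesc_flag a (a.length - 1 - 0) 0 rfl]
  rw [adj_iff_getElem_ge, beq_iff_eq, eq_sorted_rev_iff_adj]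

-- ===== VERDICT (by name: the statement is the Claim_ definition above) =====
theorem verifyOrder_spec : Claim_equal_verifyOrder := by
  intro array _
  unfold Spec_verifyOrder verifyOrder verifyOrder_alt
  dsimp only
  rw [asc_flag_eq array 0, desc_flag_eq array]
  cases array == PySem.List.sorted array (fun x => x) false <;>
    cases array == PySem.List.sorted array (fun x => x) true <;> simp
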